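-- pv_equiv track=rewrite | github.com/DavidDuncker/FultonCountyBallotScanner | canvass/collect_precinct_level_data.py | print_out_results_in_csv_format
-- ===== SOURCE A (Python) =====
-- def print_out_results_in_csv_format(tally_of_canvass, delimiter=";"):
--     output_string = ""
--     output_string += f"County{delimiter}Precinct{delimiter}All Voters{delimiter}Early/Absentee Voters{delimiter}Election Day Voters\n"
--
--     counties = list(tally_of_canvass.keys())
--     counties.sort()
--     for county in counties:
--         precincts = tally_of_canvass[county].keys()
--         precincts = list(precincts)
--         precincts.sort()
--
--         special_precincts = []
--         for precinct in precincts: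
--             if "UNKNOWN" in precinct:
--                 special_precincts.append(precinct)
--
--         for precinct in special_precincts:
--             if precinct in precincts:
--                 precincts.remove(precinct)
--
--         formatted_precincts = special_precincts
--         formatted_precincts.extend(precincts)
--
--         for precinct in formatted_precincts:
--             try:
--                 all_voters = tally_of_canvass[county][precinct]["All Voters"]
--             except KeyError:
--                 all_voters = 0
--             try:
--                 early_voters = tally_of_canvass[county][precinct]["Early Voters"]
--             except KeyError:
--                 early_voters = 0
--             try:
--                 ed_voters = tally_of_canvass[county][precinct]["Election Day Voters"]
--             except KeyError:
--                 ed_voters = 0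
--
--             output_string += f"{county}{delimiter}{precinct}{delimiter}{all_voters}{delimiter}{early_voters}{delimiter}{ed_voters}\n"
--
--     return output_string
-- ===== SOURCE B (Python) =====
-- def print_out_results_in_csv_format(tally_of_canvass, delimiter=";"):
--     rows = []
--     for county, precinct_tallies in tally_of_canvass.items():
--         for precinct, tallies in precinct_tallies.items():
--             rank = ("0" if "UNKNOWN" in precinct else "1") + precinct
--             rows.append((county, rank, precinct, tallies))
--     rows.sort(key=lambda r: (r[0], r[1]))
--     out = [f"County{delimiter}Precinct{delimiter}All Voters{delimiter}Early/Absentee Voters{delimiter}Election Day Voters\n"]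
--     for county, _, precinct, tallies in rows:
--         out.append(f"{county}{delimiter}{precinct}{delimiter}"
--                    f"{tallies.get('All Voters', 0)}{delimiter}"
--                    f"{tallies.get('Early Voters', 0)}{delimiter}"
--                    f"{tallies.get('Election Day Voters', 0)}\n")
--     return "".join(out)
-- ===== Notes on version B (the rewrite author's own statement) =====
-- stated objective: alternative
-- what changed: Instead of A's per-county pipeline (sort precinct keys, collect UNKNOWN precincts, quadratic remove loop, extend, emit while looping over sorted counties), B flattens the whole tally into one global list of row tuples, gives each row a composite sort key (county, rank-tagged precinct) and does a single global sort followed by a single emission pass joining the rows.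
import Mathlib
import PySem

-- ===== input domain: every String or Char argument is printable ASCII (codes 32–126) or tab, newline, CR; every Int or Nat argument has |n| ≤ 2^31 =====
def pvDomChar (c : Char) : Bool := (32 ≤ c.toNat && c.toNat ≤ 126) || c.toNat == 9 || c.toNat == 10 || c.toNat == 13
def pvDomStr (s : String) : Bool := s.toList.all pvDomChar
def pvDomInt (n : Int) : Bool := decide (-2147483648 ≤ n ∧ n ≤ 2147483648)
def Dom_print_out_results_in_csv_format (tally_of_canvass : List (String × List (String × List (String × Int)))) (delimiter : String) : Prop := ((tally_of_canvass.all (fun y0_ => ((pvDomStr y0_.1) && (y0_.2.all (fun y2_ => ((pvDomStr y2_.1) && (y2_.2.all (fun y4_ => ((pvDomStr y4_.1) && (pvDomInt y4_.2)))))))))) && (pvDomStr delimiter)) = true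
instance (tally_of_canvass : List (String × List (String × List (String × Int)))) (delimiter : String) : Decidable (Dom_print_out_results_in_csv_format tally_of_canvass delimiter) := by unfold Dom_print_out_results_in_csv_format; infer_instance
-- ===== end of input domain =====

-- B replaces A's per-county ordering pipeline (sort, collect UNKNOWN precincts, remove loop,
-- extend, nested emission) with one globally flattened row list sorted once by a composite
-- (county, rank-tagged precinct) key and emitted in a single pass; objective: alternative.

-- ===== PORT A =====
-- Faithful transliteration of A: sort counties; per county sort precincts, collect
-- "UNKNOWN" precincts, remove them from the sorted list, put them first; build the
-- output by repeated string concatenation; KeyError-guarded lookups become getD 0.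
def print_out_results_in_csv_format (tally_of_canvass : List (String × List (String × List (String × Int)))) (delimiter : String) : String :=
  let d : PySem.Dict String (List (String × List (String × Int))) := PySem.Dict.ofList tally_of_canvass
  let output_string : String :=
    "" ++ ("County" ++ delimiter ++ "Precinct" ++ delimiter ++ "All Voters" ++ delimiter ++ "Early/Absentee Voters" ++ delimiter ++ "Election Day Voters" ++ "\n")
  let counties := PySem.List.sorted d.keys (fun x => x) false
  counties.foldl (fun acc county =>
    let pd : PySem.Dict String (List (String × Int)) := PySem.Dict.ofList (d.getD county [])
    let precincts := PySem.List.sorted pd.keys (fun x => x) false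
    let special_precincts := precincts.foldl (fun sp precinct =>
      if PySem.Str.isIn "UNKNOWN" precinct then sp ++ [precinct] else sp) []
    let precincts := special_precincts.foldl (fun ps precinct =>
      if ps.contains precinct then (PySem.List.remove? ps precinct).getD ps else ps) precincts
    let formatted_precincts := special_precincts ++ precincts
    formatted_precincts.foldl (fun acc2 precinct =>
      let vd : PySem.Dict String Int := PySem.Dict.ofList (pd.getD precinct [])
      let all_voters := vd.getD "All Voters" 0
      let early_voters := vd.getD "Early Voters" 0
      let ed_voters := vd.getD "Election Day Voters" 0
      acc2 ++ (county ++ delimiter ++ precinct ++ delimiter ++ PySem.Int.toStr all_voters ++ delimiter ++ PySem.Int.toStr early_voters ++ delimiter ++ PySem.Int.toStr ed_voters ++ "\n")) acc) output_string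

-- ===== PORT B =====
-- Transliteration of B: flatten every (county, precinct) pair into one row-tuple list with a
-- rank-tagged precinct, one global sort by the two-component key, one emission pass, "".join.
def print_out_results_in_csv_format_alt (tally_of_canvass : List (String × List (String × List (String × Int)))) (delimiter : String) : String :=
  let d : PySem.Dict String (List (String × List (String × Int))) := PySem.Dict.ofList tally_of_canvass
  let rows : List (String × String × String × List (String × Int)) :=
    d.items.foldl (fun rs cp =>
      (PySem.Dict.ofList cp.2).items.foldl (fun rs2 pt =>
        let rank := (if PySem.Str.isIn "UNKNOWN" pt.1 then "0" else "1") ++ pt.1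
        rs2 ++ [(cp.1, rank, pt.1, pt.2)]) rs) []
  let rows := PySem.List.sorted2 rows (fun r => r.1) (fun r => r.2.1) false
  let out : List String :=
    rows.foldl (fun os r =>
      let tallies : PySem.Dict String Int := PySem.Dict.ofList r.2.2.2
      os ++ [r.1 ++ delimiter ++ r.2.2.1 ++ delimiter ++ PySem.Int.toStr (tallies.getD "All Voters" 0) ++ delimiter ++ PySem.Int.toStr (tallies.getD "Early Voters" 0) ++ delimiter ++ PySem.Int.toStr (tallies.getD "Election Day Voters" 0) ++ "\n"])
      ["County" ++ delimiter ++ "Precinct" ++ delimiter ++ "All Voters" ++ delimiter ++ "Early/Absentee Voters" ++ delimiter ++ "Election Day Voters" ++ "\n"]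
  PySem.Str.join "" out

-- ===== PRECONDITION & SPEC =====
def Spec_print_out_results_in_csv_format (tally_of_canvass : List (String × List (String × List (String × Int)))) (delimiter : String) (out : String) : Prop := out = print_out_results_in_csv_format_alt tally_of_canvass delimiter
instance (tally_of_canvass : List (String × List (String × List (String × Int)))) (delimiter : String) (out : String) : Decidable (Spec_print_out_results_in_csv_format tally_of_canvass delimiter out) := by unfold Spec_print_out_results_in_csv_format; infer_instance

-- ===== CLAIM (what is proved, stated in full; the proofs are below) =====
def Claim_equal_print_out_results_in_csv_format : Prop := ∀ (tally_of_canvass : List (String × List (String × List (String × Int)))) (delimiter : String), Dom_print_out_results_in_csv_format tally_of_canvass delimiter → Spec_print_out_results_in_csv_format tally_of_canvass delimiter (print_out_results_in_csv_format tally_of_canvass delimiter)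

-- ===== LEMMAS AND PROOFS =====

-- Proof-side abbreviations: the rank tag, A's per-county precinct order, and the row list
-- both programs ultimately print.
def pvRank (p : String) : String := (if PySem.Str.isIn "UNKNOWN" p then "0" else "1") ++ p

def pvOrdered (pl : List (String × List (String × Int))) : List String :=
  PySem.List.sorted ((PySem.Dict.ofList pl).keys.filter (fun p => PySem.Str.isIn "UNKNOWN" p)) (fun x => x) ++
  PySem.List.sorted ((PySem.Dict.ofList pl).keys.filter (fun p => !PySem.Str.isIn "UNKNOWN" p)) (fun x => x)

def pvRows (t : List (String × List (String × List (String × Int)))) : List (String × String × String × List (String × Int)) :=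
  (PySem.List.sorted (PySem.Dict.ofList t).keys (fun x => x) false).flatMap (fun c =>
    (pvOrdered ((PySem.Dict.ofList t).getD c [])).map (fun p =>
      (c, pvRank p, p, (PySem.Dict.ofList ((PySem.Dict.ofList t).getD c [])).getD p [])))

def pvCat : List String → String
  | [] => ""
  | x :: t => x ++ pvCat t

theorem pvCat_append (l1 l2 : List String) : pvCat (l1 ++ l2) = pvCat l1 ++ pvCat l2 := by
  induction l1 with
  | nil => simp [pvCat]
  | cons x t ih => simp [pvCat, ih, String.append_assoc]

theorem pvFoldl_append_str {α : Type} (f : α → String) (l : List α) (a : String) :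
    l.foldl (fun acc x => acc ++ f x) a = a ++ pvCat (l.map f) := by
  induction l generalizing a with
  | nil => simp [pvCat]
  | cons x t ih => simp [pvCat, ih, String.append_assoc]

theorem pvCat_flatMap {α : Type} (g : α → List String) (l : List α) :
    pvCat (l.map (fun c => pvCat (g c))) = pvCat (l.flatMap g) := by
  induction l with
  | nil => rfl
  | cons x t ih => simp [pvCat, ih, pvCat_append]

theorem pvJoinEmpty (l : List String) : PySem.Str.join "" l = pvCat l := by
  induction l with
  | nil => rfl
  | cons x t ih =>
    cases t with
    | nil =>
      apply String.toList_inj.mp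
      simp [PySem.Str.join, PySem.Chars.join_singleton, pvCat]
    | cons y u =>
      have hc : PySem.Str.join "" (x :: y :: u) = x ++ "" ++ PySem.Str.join "" (y :: u) := by
        apply String.toList_inj.mp
        simp [PySem.Str.join, PySem.Chars.join_cons_cons]
      rw [hc, ih]
      simp [pvCat]

-- A's removal fold and resulting precinct order (A-side characterisation).
theorem pvRemoveFold (l : List String) (s : List String) (hs : s.Nodup) :
    l.foldl (fun ps p => if ps.contains p then (PySem.List.remove? ps p).getD ps else ps) s
      = s.filter (fun x => !l.contains x) := by
  induction l generalizing s with
  | nil => simp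
  | cons p t ih =>
    simp only [List.foldl_cons]
    by_cases hp : p ∈ s
    · rw [if_pos (by simpa using hp), PySem.List.remove?_eq_some_erase _ _ hp]
      simp only [Option.getD_some]
      rw [ih _ (hs.erase p), hs.erase_eq_filter]
      rw [List.filter_filter]
      apply List.filter_congr
      intro x hx
      by_cases hxp : x = p <;> simp [hxp]
    · rw [if_neg (by simpa using hp)]
      rw [ih _ hs]
      apply List.filter_congr
      intro x hx
      have : x ≠ p := fun h => hp (h ▸ hx)
      simp [this]

theorem pvOrderAll (ks : List String) (hk : ks.Nodup) (P : String → Bool) :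
    List.filter P (PySem.List.sorted ks (fun x => x)) ++
      List.foldl (fun ps p => if ps.contains p = true then (PySem.List.remove? ps p).getD ps else ps)
        (PySem.List.sorted ks (fun x => x)) (List.filter P (PySem.List.sorted ks (fun x => x)))
    = PySem.List.sorted (ks.filter P) (fun x => x) ++ PySem.List.sorted (ks.filter (fun p => !P p)) (fun x => x) := by
  have hperm : (PySem.List.sorted ks (fun x => x) false).Perm ks := PySem.List.sorted_perm ks (fun x => x) false
  have hnodup : (PySem.List.sorted ks (fun x => x) false).Nodup := (hperm.nodup_iff).mpr hk
  rw [pvRemoveFold _ _ hnodup]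
  have h2 : List.filter (fun x => !(List.filter P (PySem.List.sorted ks (fun x => x))).contains x)
      (PySem.List.sorted ks (fun x => x)) = List.filter (fun p => !P p) (PySem.List.sorted ks (fun x => x)) := by
    apply List.filter_congr
    intro x hx
    by_cases hP : P x <;> simp [hP, List.mem_filter, hx]
  rw [h2]
  have hlt : (PySem.List.sorted ks (fun x => x) false).Pairwise (fun a b => a < b) := by
    have hpair : (PySem.List.sorted ks (fun x => x) false).Pairwise (fun a b => a ≤ b) :=
      PySem.List.sorted_pairwise ks (fun x => x)
    exact (List.Pairwise.and hpair hnodup).imp (fun h => lt_of_le_of_ne h.1 h.2)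
  rw [PySem.List.sorted_eq_of_perm_of_pairwise_lt _ _ (fun x => x) (hperm.filter P) (hlt.filter P),
    PySem.List.sorted_eq_of_perm_of_pairwise_lt _ _ (fun x => x) (hperm.filter _) (hlt.filter _)]

-- B's two-key sort IS the sort by the lexicographic pair key.
theorem pvSorted2Lex {α : Type} (xs : List α) (k1 k2 : α → String) :
    PySem.List.sorted2 xs k1 k2 false
      = PySem.List.sorted xs (fun x => (toLex (k1 x, k2 x) : Lex (String × String))) false := by
  have key : ∀ a b : α, ((toLex (k1 a, k2 a) : Lex (String × String)) < toLex (k1 b, k2 b))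
      ↔ (k1 a < k1 b ∨ (¬ k1 b < k1 a ∧ k2 a < k2 b)) := by
    intro a b
    rw [Prod.Lex.lt_iff]
    simp only [ofLex_toLex]
    constructor
    · rintro (h | ⟨h1, h2⟩)
      · exact Or.inl h
      · exact Or.inr ⟨by rw [h1]; exact lt_irrefl _, h2⟩
    · rintro (h | ⟨h1, h2⟩)
      · exact Or.inl h
      · rcases (not_lt.mp h1).lt_or_eq with h' | h'
        · exact Or.inl h'
        · exact Or.inr ⟨h', h2⟩
  have hfun : (fun a b => decide (k1 a < k1 b) || (!decide (k1 b < k1 a) && decide (k2 a < k2 b)))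
      = (fun a b => decide ((toLex (k1 a, k2 a) : Lex (String × String)) < toLex (k1 b, k2 b))) := by
    funext a b
    by_cases h1 : k1 a < k1 b <;> by_cases h2 : k1 b < k1 a <;> by_cases h3 : k2 a < k2 b <;>
      simp [h1, h2, h3, key]
  simp only [PySem.List.sorted2, PySem.List.sorted, Bool.false_eq_true, if_false, hfun]

-- Rank-tag comparison facts.
theorem pvTagSame (a : Char) (c p q : String) (h : p < q) (hc : c.toList = [a]) :
    (c ++ p) < (c ++ q) := by
  rw [String.lt_iff_toList_lt] at h ⊢
  simp [hc, h]

theorem pvTagCross (p q : String) : ("0" ++ p) < ("1" ++ q) := by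
  rw [String.lt_iff_toList_lt]
  have h0 : ("0" ++ p).toList = '0' :: p.toList := by simp
  have h1 : ("1" ++ q).toList = '1' :: q.toList := by simp
  rw [h0, h1]
  exact List.cons_lt_cons_iff.mpr (Or.inl (by decide))

-- Strict rank order of A's per-county precinct sequence.
theorem pvRankOrdered (pl : List (String × List (String × Int))) :
    (pvOrdered pl).Pairwise (fun p q => pvRank p < pvRank q) := by
  have hnd : ((PySem.Dict.ofList pl).keys).Nodup := PySem.Dict.nodup_keys_ofList pl
  have hlt : ∀ (P : String → Bool),
      (PySem.List.sorted ((PySem.Dict.ofList pl).keys.filter P) (fun x => x) false).Pairwise (fun a b => a < b) := by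
    intro P
    have hperm := PySem.List.sorted_perm ((PySem.Dict.ofList pl).keys.filter P) (fun x => x) false
    have hnodup : (PySem.List.sorted ((PySem.Dict.ofList pl).keys.filter P) (fun x => x) false).Nodup :=
      (hperm.nodup_iff).mpr (hnd.filter P)
    have hpair := PySem.List.sorted_pairwise ((PySem.Dict.ofList pl).keys.filter P) (fun x => x)
    exact (List.Pairwise.and hpair hnodup).imp (fun h => lt_of_le_of_ne h.1 h.2)
  have hmem : ∀ (P : String → Bool) (p : String),
      p ∈ PySem.List.sorted ((PySem.Dict.ofList pl).keys.filter P) (fun x => x) false → P p = true := by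
    intro P p hp
    have := (PySem.List.mem_sorted ((PySem.Dict.ofList pl).keys.filter P) (fun x => x) false p).mp hp
    exact (List.mem_filter.mp this).2
  rw [pvOrdered, List.pairwise_append]
  refine ⟨?_, ?_, ?_⟩
  · refine (hlt _).imp_of_mem ?_
    intro p q hp hq h
    rw [pvRank, pvRank, if_pos (hmem _ p hp), if_pos (hmem _ q hq)]
    exact pvTagSame '0' "0" p q h (by decide)
  · refine (hlt _).imp_of_mem ?_
    intro p q hp hq h
    have hp0 : PySem.Str.isIn "UNKNOWN" p = false := by
      have := hmem _ p hp; cases hx : PySem.Str.isIn "UNKNOWN" p <;> simp_all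
    have hq0 : PySem.Str.isIn "UNKNOWN" q = false := by
      have := hmem _ q hq; cases hx : PySem.Str.isIn "UNKNOWN" q <;> simp_all
    have hp' : ¬ PySem.Str.isIn "UNKNOWN" p = true := by rw [hp0]; simp
    have hq' : ¬ PySem.Str.isIn "UNKNOWN" q = true := by rw [hq0]; simp
    rw [pvRank, pvRank, if_neg hp', if_neg hq']
    exact pvTagSame '1' "1" p q h (by decide)
  · intro p hp q hq
    have hq0 : PySem.Str.isIn "UNKNOWN" q = false := by
      have := hmem _ q hq; cases hx : PySem.Str.isIn "UNKNOWN" q <;> simp_all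
    have hq' : ¬ PySem.Str.isIn "UNKNOWN" q = true := by rw [hq0]; simp
    rw [pvRank, pvRank, if_pos (hmem _ p hp), if_neg hq']
    exact pvTagCross p q

-- pvRows is a permutation of B's flattened row list.
theorem pvPermRows (t : List (String × List (String × List (String × Int)))) :
    (pvRows t).Perm
      ((PySem.Dict.ofList t).items.flatMap (fun cp =>
        (PySem.Dict.ofList cp.2).items.map (fun pt => (cp.1, pvRank pt.1, pt.1, pt.2)))) := by
  have hd := PySem.Dict.items_eq_map_keys (PySem.Dict.ofList t) (PySem.Dict.nodup_keys_ofList t) []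
  have hinner : ∀ c : String,
      ((PySem.Dict.ofList ((PySem.Dict.ofList t).getD c [])).items.map
        (fun pt => (c, pvRank pt.1, pt.1, pt.2)))
      = ((PySem.Dict.ofList ((PySem.Dict.ofList t).getD c [])).keys.map
        (fun p => (c, pvRank p, p, (PySem.Dict.ofList ((PySem.Dict.ofList t).getD c [])).getD p []))) := by
    intro c
    rw [PySem.Dict.items_eq_map_keys _ (PySem.Dict.nodup_keys_ofList _) [], List.map_map]
    rfl
  have hstep : ((PySem.Dict.ofList t).items.flatMap (fun cp =>
        (PySem.Dict.ofList cp.2).items.map (fun pt => (cp.1, pvRank pt.1, pt.1, pt.2))))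
      = ((PySem.Dict.ofList t).keys.flatMap (fun c =>
        (PySem.Dict.ofList ((PySem.Dict.ofList t).getD c [])).keys.map
          (fun p => (c, pvRank p, p, (PySem.Dict.ofList ((PySem.Dict.ofList t).getD c [])).getD p [])))) := by
    rw [hd, List.flatMap_map]
    congr 1
    funext c
    exact hinner c
  rw [hstep]
  simp only [pvRows]
  refine (List.Perm.flatMap_right _ (PySem.List.sorted_perm _ _ false)).trans ?_
  apply List.Perm.flatMap_left
  intro c _
  apply List.Perm.map
  exact (List.Perm.append (PySem.List.sorted_perm _ _ false) (PySem.List.sorted_perm _ _ false)).trans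
    (List.filter_append_perm _ _)

-- Strict pairwise composite-key order of pvRows.
theorem pvPairwiseRows (t : List (String × List (String × List (String × Int)))) :
    (pvRows t).Pairwise (fun a b =>
      (toLex (a.1, a.2.1) : Lex (String × String)) < toLex (b.1, b.2.1)) := by
  rw [pvRows, List.pairwise_flatMap]
  constructor
  · intro c _
    rw [List.pairwise_map]
    refine (pvRankOrdered _).imp ?_
    intro p q h
    simp [Prod.Lex.lt_iff, h]
  · have hperm := PySem.List.sorted_perm (PySem.Dict.ofList t).keys (fun x => x) false
    have hnodup : (PySem.List.sorted (PySem.Dict.ofList t).keys (fun x => x) false).Nodup :=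
      (hperm.nodup_iff).mpr (PySem.Dict.nodup_keys_ofList t)
    have hpair := PySem.List.sorted_pairwise (PySem.Dict.ofList t).keys (fun x => x)
    have hlt : (PySem.List.sorted (PySem.Dict.ofList t).keys (fun x => x) false).Pairwise (fun a b => a < b) :=
      (List.Pairwise.and hpair hnodup).imp (fun h => lt_of_le_of_ne h.1 h.2)
    refine hlt.imp ?_
    intro c1 c2 h x hx y hy
    obtain ⟨p, _, rfl⟩ := List.mem_map.mp hx
    obtain ⟨q, _, rfl⟩ := List.mem_map.mp hy
    simp [Prod.Lex.lt_iff, h]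

-- The global sort of B's flattened rows is exactly pvRows (rank written literally to match B's port).
theorem pvSortEq (t : List (String × List (String × List (String × Int)))) :
    PySem.List.sorted2
      ((PySem.Dict.ofList t).items.flatMap (fun cp =>
        (PySem.Dict.ofList cp.2).items.map
          (fun pt => (cp.1, (if PySem.Str.isIn "UNKNOWN" pt.1 then "0" else "1") ++ pt.1, pt.1, pt.2))))
      (fun r => r.1) (fun r => r.2.1) false
    = pvRows t := by
  rw [pvSorted2Lex]
  exact PySem.List.sorted_eq_of_perm_of_pairwise_lt _ _ _ (pvPermRows t) (pvPairwiseRows t)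

theorem pvMain (t : List (String × List (String × List (String × Int)))) (delim : String) :
    print_out_results_in_csv_format t delim = print_out_results_in_csv_format_alt t delim := by
  unfold print_out_results_in_csv_format print_out_results_in_csv_format_alt
  simp only [pvFoldl_append_str, PySem.List.foldl_append_if,
    PySem.List.foldl_append_singleton_eq_map, PySem.List.foldl_append_eq_flatMap,
    List.nil_append, List.singleton_append, String.empty_append, List.map_id']
  rw [pvJoinEmpty, pvSortEq t]
  have hOrd : ∀ pl : List (String × List (String × Int)),
      List.filter (PySem.Str.isIn "UNKNOWN") (PySem.List.sorted (PySem.Dict.ofList pl).keys (fun x => x)) ++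
        List.foldl (fun ps p => if ps.contains p = true then (PySem.List.remove? ps p).getD ps else ps)
          (PySem.List.sorted (PySem.Dict.ofList pl).keys (fun x => x))
          (List.filter (PySem.Str.isIn "UNKNOWN") (PySem.List.sorted (PySem.Dict.ofList pl).keys (fun x => x)))
      = pvOrdered pl :=
    fun pl => pvOrderAll _ (PySem.Dict.nodup_keys_ofList pl) _
  simp only [hOrd, pvCat_flatMap, pvCat, pvRows, pvRank, List.map_flatMap, List.map_map,
    Function.comp_def, String.append_assoc]

-- ===== VERDICT (by name: the statement is the Claim_ definition above) =====
theorem print_out_results_in_csv_format_spec : Claim_equal_print_out_results_in_csv_format := by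
  intro t delim _
  show print_out_results_in_csv_format t delim = print_out_results_in_csv_format_alt t delim
  exact pvMain t delim
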